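-- pv_equiv track=rewrite | github.com/pypi-data/pypi-mirror-46 | packages/mdio/mdio-0.2.0.tar.gz/mdio-0.2.0/mdio/base.py | _parser_1
-- ===== SOURCE A (Python) =====
-- def _parser_1(expression):
--     words = expression.split()
--     sub_expressions = []
--     i = 0
--     sub_expression = []
--     for w in words:
--         if w in ['and', 'or']:
--             sub_expressions.append(" ".join(sub_expression))
--             sub_expression = []
--             sub_expressions.append(w)
--         else:
--             sub_expression.append(w)
--     sub_expressions.append(" ".join(sub_expression))
--     return sub_expressions
-- ===== SOURCE B (Python) =====
-- def _parser_1(expression):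
--     words = expression.split()
--     idxs = [i for i, w in enumerate(words) if w in ('and', 'or')]
--     out = []
--     prev = 0
--     for i in idxs:
--         out.append(" ".join(words[prev:i]))
--         out.append(words[i])
--         prev = i + 1
--     out.append(" ".join(words[prev:]))
--     return out
-- ===== Notes on version B (the rewrite author's own statement) =====
-- stated objective: alternative
-- what changed: B first collects the indices of 'and'/'or' words in one pass, then extracts the segments between consecutive delimiter indices by slicing and joining, instead of A's single accumulate-and-flush loop that grows a pending word buffer.
import Mathlib
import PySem

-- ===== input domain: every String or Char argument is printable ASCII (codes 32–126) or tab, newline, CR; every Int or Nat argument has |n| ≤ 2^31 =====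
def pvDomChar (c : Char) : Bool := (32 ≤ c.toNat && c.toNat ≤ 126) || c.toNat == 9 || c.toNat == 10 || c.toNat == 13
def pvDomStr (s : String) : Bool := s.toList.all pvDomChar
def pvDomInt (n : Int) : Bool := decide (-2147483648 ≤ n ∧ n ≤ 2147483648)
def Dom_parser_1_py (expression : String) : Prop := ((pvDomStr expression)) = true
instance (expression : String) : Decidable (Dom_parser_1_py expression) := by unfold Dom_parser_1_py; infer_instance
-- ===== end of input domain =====

-- B separates delimiter-finding (a first pass collecting the indices of 'and'/'or')
-- from segment extraction (slicing between consecutive delimiter indices), instead of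
-- A's accumulate-and-flush loop; same O(n) cost, different decomposition.

-- ===== PORT A =====
-- loop body of A's 'for w in words'
def pvStepA (st : List String × List String) (w : String) : List String × List String :=
  if w == "and" || w == "or" then
    (st.1 ++ [PySem.Str.join " " st.2, w], [])
  else
    (st.1, st.2 ++ [w])

def parser_1_py (expression : String) : List String :=
  let words := PySem.Str.split₀ expression
  let st := words.foldl pvStepA ([], [])
  st.1 ++ [PySem.Str.join " " st.2]

-- ===== PORT B =====
-- loop body of B's 'for i in idxs'
def pvStepB (words : List String) (st : List String × Int) (i : Int) : List String × Int :=
  (st.1 ++ [PySem.Str.join " " (PySem.List.slice words (some st.2) (some i)),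
            PySem.List.pyGetD words i ""],
   i + 1)

def parser_1_py_alt (expression : String) : List String :=
  let words := PySem.Str.split₀ expression
  let idxs := ((PySem.List.enumerate words).filter (fun p => p.2 == "and" || p.2 == "or")).map (·.1)
  let st := idxs.foldl (pvStepB words) ([], 0)
  st.1 ++ [PySem.Str.join " " (PySem.List.slice words (some st.2) none)]

-- ===== PRECONDITION & SPEC =====
def Spec_parser_1_py (expression : String) (out : List String) : Prop := out = parser_1_py_alt expression
instance (expression : String) (out : List String) : Decidable (Spec_parser_1_py expression out) := by unfold Spec_parser_1_py; infer_instance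

-- ===== CLAIM (what is proved, stated in full; the proofs are below) =====
def Claim_equal_parser_1_py : Prop := ∀ (expression : String), Dom_parser_1_py expression → Spec_parser_1_py expression (parser_1_py expression)

-- ===== LEMMAS AND PROOFS =====

-- Main invariant: processing the suffix 'full.drop n' with A's loop (pending segment
-- 'words[p:n]') produces the same final list as B's loop over the delimiter indices of
-- that suffix with cursor prev = p.
lemma pv_main (full : List String) :
    ∀ (suf : List String) (p n : Nat) (acc : List String),
      full.drop n = suf → p ≤ n →
      (let stA := suf.foldl pvStepA (acc, (full.drop p).take (n - p))
       stA.1 ++ [PySem.Str.join " " stA.2])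
      =
      (let stB := (((PySem.List.enumerate suf (n : Int)).filter
                      (fun q => q.2 == "and" || q.2 == "or")).map (·.1)).foldl
                    (pvStepB full) (acc, (p : Int))
       stB.1 ++ [PySem.Str.join " " (PySem.List.slice full (some stB.2) none)]) := by
  intro suf
  induction suf with
  | nil =>
    intro p n acc hdrop hpn
    simp only [List.foldl_nil, PySem.List.enumerate_nil, List.filter_nil, List.map_nil]
    rw [PySem.List.slice_from_natCast]
    have hlen : full.length ≤ n := by
      by_contra h
      have := List.drop_eq_nil_iff.mp hdrop
      omega
    have : (full.drop p).take (n - p) = full.drop p := by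
      apply List.take_of_length_le
      simp [List.length_drop]; omega
    rw [this]
  | cons w suf' ih =>
    intro p n acc hdrop hpn
    have hn : n < full.length := by
      by_contra h
      have : full.drop n = [] := List.drop_eq_nil_iff.mpr (by omega)
      rw [this] at hdrop; simp at hdrop
    have hdrop' : full.drop (n + 1) = suf' := by
      have h1 : full.drop (n + 1) = List.drop 1 (full.drop n) := by
        rw [List.drop_drop]
      rw [h1, hdrop, List.drop_one, List.tail_cons]
    have hget : full[n]? = some w := by
      have h2 : (full.drop n)[0]? = full[n + 0]? := List.getElem?_drop ..
      simp only [Nat.add_zero] at h2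
      rw [← h2, hdrop]; rfl
    simp only [PySem.List.enumerate_cons, List.foldl_cons]
    by_cases hkw : (w == "and" || w == "or") = true
    · -- keyword: A flushes, B consumes index n
      simp only [List.filter_cons, hkw, if_true, List.map_cons, List.foldl_cons]
      rw [show pvStepA (acc, (full.drop p).take (n - p)) w
            = (acc ++ [PySem.Str.join " " ((full.drop p).take (n - p)), w], []) by
            simp [pvStepA, hkw]]
      rw [show pvStepB full (acc, (p : Int)) (n : Int)
            = (acc ++ [PySem.Str.join " " ((full.drop p).take (n - p)),
                       PySem.List.pyGetD full (n : Int) ""], (n : Int) + 1) by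
            simp [pvStepB, PySem.List.slice_natCast]]
      have hgetD : PySem.List.pyGetD full (n : Int) "" = w := by
        rw [PySem.List.pyGetD_natCast]
        simp [List.getD, hget]
      rw [hgetD]
      have hcast : ((n : Int) + 1) = ((n + 1 : Nat) : Int) := by push_cast; ring
      rw [hcast]
      have := ih (n + 1) (n + 1) (acc ++ [PySem.Str.join " " ((full.drop p).take (n - p)), w])
        hdrop' (le_refl _)
      simpa using this
    · -- ordinary word: A extends the pending segment, B skips
      have hkw' : (w == "and" || w == "or") = false := by simpa using hkw
      simp only [List.filter_cons, hkw', Bool.false_eq_true, if_false]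
      rw [show pvStepA (acc, (full.drop p).take (n - p)) w
            = (acc, (full.drop p).take (n - p) ++ [w]) by
            simp [pvStepA, hkw]]
      have hseg : (full.drop p).take (n - p) ++ [w] = (full.drop p).take (n + 1 - p) := by
        have h1 : n + 1 - p = (n - p) + 1 := by omega
        rw [h1, List.take_add_one]
        have h3 : (full.drop p)[n - p]? = some w := by
          rw [List.getElem?_drop]
          have h4 : p + (n - p) = n := by omega
          rw [h4, hget]
        simp [h3]
      rw [hseg]
      have := ih p (n + 1) acc hdrop' (by omega)
      simpa using this

-- ===== VERDICT (by name: the statement is the Claim_ definition above) =====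
theorem parser_1_py_spec : Claim_equal_parser_1_py := by
  intro expression _
  unfold Spec_parser_1_py parser_1_py parser_1_py_alt
  have := pv_main (PySem.Str.split₀ expression) (PySem.Str.split₀ expression) 0 0 []
    (by simp) (le_refl 0)
  simpa using this
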